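-- pv_equiv track=rewrite | github.com/scartill/tagth | tagth.py | _resolve_internal
-- ===== SOURCE A (Python) =====
-- ANYONE_PRINCIPAL = 'any'
--
-- def _resolve_internal(principal, resource):
--     actions = set()
--
--     if not resource:
--         return
--
--     for (res_tag, action) in resource:
--         if res_tag == ANYONE_PRINCIPAL:
--             actions.add(action)
--
--     if not principal:
--         return
--
--     for pr_tag in principal:
--         if not pr_tag:
--             continue
--
--         for (res_tag, action) in resource:
--             if res_tag.startswith(pr_tag):
--                 actions.add(action)
--
--     return actions
-- ===== SOURCE B (Python) =====
-- ANYONE_PRINCIPAL = 'any'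
--
--
-- def _resolve_internal(principal, resource):
--     if not resource or not principal:
--         return
--     # Sieve: one matcher per stage ('any' first, then each non-empty principal
--     # tag as a prefix matcher); each stage consumes its matches out of the
--     # remaining resource entries, so every entry is claimed by at most one
--     # stage (its first match) instead of being re-scanned by every stage.
--     matchers = [lambda t: t == ANYONE_PRINCIPAL]
--     matchers += [(lambda p: (lambda t: t.startswith(p)))(p) for p in principal if p]
--     collected = []
--     remaining = resource
--     for matches in matchers:
--         rest = []
--         for res_tag, action in remaining:
--             if matches(res_tag):
--                 collected.append(action)
--             else:
--                 rest.append((res_tag, action))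
--         remaining = rest
--     return set(collected)
-- ===== Notes on version B (the rewrite author's own statement) =====
-- stated objective: alternative
-- what changed: Replaces A's two separate passes (an 'any' scan plus a principal-outer/resource-inner rescan of the whole resource per principal tag, deduplicating through the set) by a partition sieve: a uniform list of stage matchers ('any' plus each non-empty principal prefix) where each stage splits the remaining resource entries into hits and rest, so every entry is consumed by at most its first matching stage and never rescanned.
import Mathlib
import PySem

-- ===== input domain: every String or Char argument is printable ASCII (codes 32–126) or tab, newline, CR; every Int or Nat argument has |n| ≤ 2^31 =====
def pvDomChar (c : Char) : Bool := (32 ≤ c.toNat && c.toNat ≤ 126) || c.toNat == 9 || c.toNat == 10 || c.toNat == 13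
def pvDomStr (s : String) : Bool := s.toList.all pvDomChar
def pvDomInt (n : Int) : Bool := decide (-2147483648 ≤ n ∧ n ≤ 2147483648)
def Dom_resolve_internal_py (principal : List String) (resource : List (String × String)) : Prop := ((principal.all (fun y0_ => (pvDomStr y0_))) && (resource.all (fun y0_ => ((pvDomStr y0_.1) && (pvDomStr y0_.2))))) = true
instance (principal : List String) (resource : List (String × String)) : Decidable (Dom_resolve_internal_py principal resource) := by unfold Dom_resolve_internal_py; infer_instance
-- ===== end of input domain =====

-- B replaces A's two full-resource passes (the 'any' scan and the per-principal
-- rescans, deduplicated through the set) by a partition sieve over a uniform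
-- matcher list, each stage consuming its mf out of the remaining entries.

-- ===== PORT A =====
def resolve_internal_py (principal : List String) (resource : List (String × String)) : Option (List String) :=
  let actions : PySem.Set String := PySem.Set.empty
  if resource = [] then none
  else
    let actions := resource.foldl
      (fun acc p => if p.1 == "any" then PySem.Set.add acc p.2 else acc) actions
    if principal = [] then none
    else
      some (principal.foldl
        (fun acc pr =>
          if pr == "" then acc
          else resource.foldl
            (fun acc2 p => if PySem.Str.startswith p.1 pr then PySem.Set.add acc2 p.2 else acc2) acc)
        actions)

-- ===== PORT B =====
def resolve_internal_py_alt (principal : List String) (resource : List (String × String)) : Option (List String) :=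
  if resource = [] ∨ principal = [] then none
  else
    let matchers : List (String → Bool) :=
      (fun t => t == "any") ::
        (principal.filter (fun p => !(p == ""))).map (fun p t => PySem.Str.startswith t p)
    let cr : List String × List (String × String) :=
      matchers.foldl
        (fun (cr : List String × List (String × String)) mf =>
          cr.2.foldl
            (fun (hr : List String × List (String × String)) e =>
              if mf e.1 then (hr.1 ++ [e.2], hr.2) else (hr.1, hr.2 ++ [e]))
            (cr.1, []))
        ([], resource)
    some (PySem.Set.ofList cr.1)

-- ===== PRECONDITION & SPEC =====
def Spec_resolve_internal_py (principal : List String) (resource : List (String × String)) (out : Option (List String)) : Prop := out = resolve_internal_py_alt principal resource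
instance (principal : List String) (resource : List (String × String)) (out : Option (List String)) : Decidable (Spec_resolve_internal_py principal resource out) := by unfold Spec_resolve_internal_py; infer_instance

-- ===== CLAIM (what is proved, stated in full; the proofs are below) =====
def Claim_equal_resolve_internal_py : Prop := ∀ (principal : List String) (resource : List (String × String)), Dom_resolve_internal_py principal resource → Spec_resolve_internal_py principal resource (resolve_internal_py principal resource)

-- ===== LEMMAS AND PROOFS =====

-- A's stage shape: one Set.update with the mf of each stage, over full xs
def pvStageFold (ms : List (String → Bool)) (acc : PySem.Set String)
    (xs : List (String × String)) : PySem.Set String :=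
  ms.foldl (fun acc m => PySem.Set.update acc ((xs.filter (fun e => m e.1)).map Prod.snd)) acc

-- B's sieve shape: each stage takes its mf, later stages see the rest
def pvBkt (ms : List (String → Bool)) (xs : List (String × String)) : List String :=
  match ms with
  | [] => []
  | m :: ms' =>
      ((xs.filter (fun e => m e.1)).map Prod.snd)
        ++ pvBkt ms' (xs.filter (fun e => !(m e.1)))

-- a conditional-add fold is an update with the filtered, projected list
theorem pv_foldl_addIf (xs : List (String × String)) (c : (String × String) → Bool)
    (s : PySem.Set String) :
    xs.foldl (fun acc x => if c x then PySem.Set.add acc x.2 else acc) s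
      = PySem.Set.update s ((xs.filter c).map Prod.snd) := by
  induction xs generalizing s with
  | nil => rfl
  | cons x xs ih =>
    by_cases h : c x = true <;> simp [h, PySem.Set.update, ih]

-- A's skip-empty principal loop is the stage fold over B's prefix matchers
theorem pv_principal_stageFold (principal : List String) (resource : List (String × String))
    (s : PySem.Set String) :
    principal.foldl
      (fun acc pr =>
        if pr == "" then acc
        else resource.foldl
          (fun acc2 p => if PySem.Str.startswith p.1 pr then PySem.Set.add acc2 p.2 else acc2) acc) s
      = pvStageFold ((principal.filter (fun p => !(p == ""))).map
          (fun p t => PySem.Str.startswith t p)) s resource := by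
  induction principal generalizing s with
  | nil => rfl
  | cons pr principal ih =>
    by_cases h : pr = ""
    · have hb : (pr == "") = true := by simpa using h
      rw [List.foldl_cons, if_pos hb]
      simp only [List.filter_cons, hb, Bool.not_true, Bool.false_eq_true, if_false]
      exact ih s
    · have hb : (pr == "") = false := by simpa using h
      simp only [List.foldl_cons, hb, Bool.false_eq_true, if_false, List.filter_cons,
        Bool.not_false, if_true, List.map_cons, pvStageFold, List.foldl_cons]
      rw [pv_foldl_addIf, ih, pvStageFold]

theorem pv_mem_update_mono {a : String} (s : PySem.Set String) (l : List String)
    (h : a ∈ s) : a ∈ PySem.Set.update s l := by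
  rw [PySem.Set.mem_update]; exact Or.inl h

-- dropping entries whose action is already in the set does not change an update
theorem pv_update_filter_drop (xs : List (String × String)) (acc : PySem.Set String)
    (d c : (String × String) → Bool)
    (h : ∀ e ∈ xs, c e = true → e.2 ∈ acc) :
    PySem.Set.update acc ((xs.filter (fun e => d e && !(c e))).map Prod.snd)
      = PySem.Set.update acc ((xs.filter d).map Prod.snd) := by
  induction xs generalizing acc with
  | nil => rfl
  | cons e xs ih =>
    have hx := fun e' he' => h e' (List.mem_cons_of_mem _ he')
    by_cases hd : d e = true
    · by_cases hc : c e = true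
      · have hmem : e.2 ∈ acc := h e (List.mem_cons_self) hc
        have : PySem.Set.add acc e.2 = acc := PySem.Set.add_of_mem hmem
        simp only [List.filter_cons, hd, hc, Bool.not_true, Bool.and_false, if_true,
          Bool.false_eq_true, if_false, List.map_cons, PySem.Set.update_cons, this]
        exact ih acc hx
      · have hc' : c e = false := by simpa using hc
        simp only [List.filter_cons, hd, hc', Bool.not_false, Bool.and_true, if_true,
          List.map_cons, PySem.Set.update_cons]
        exact ih (PySem.Set.add acc e.2)
          (fun e' he' hce' => by
            rw [PySem.Set.mem_add]; exact Or.inl (hx e' he' hce'))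
    · have hd' : d e = false := by simpa using hd
      simp only [List.filter_cons, hd', Bool.false_and, Bool.false_eq_true, if_false]
      exact ih acc hx

-- later stages may ignore entries an earlier stage matched, once their actions are in
theorem pv_stageFold_filter (ms : List (String → Bool)) (acc : PySem.Set String)
    (xs : List (String × String)) (c : (String × String) → Bool)
    (h : ∀ e ∈ xs, c e = true → e.2 ∈ acc) :
    pvStageFold ms acc xs = pvStageFold ms acc (xs.filter (fun e => !(c e))) := by
  induction ms generalizing acc with
  | nil => rfl
  | cons m ms ih =>
    simp only [pvStageFold, List.foldl_cons]
    have hfilt : (xs.filter (fun e => !(c e))).filter (fun e => m e.1)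
        = xs.filter (fun e => m e.1 && !(c e)) := by
      rw [List.filter_filter]
    rw [hfilt, pv_update_filter_drop xs acc _ c h]
    exact ih (PySem.Set.update acc ((xs.filter (fun e => m e.1)).map Prod.snd))
      (fun e he hce => pv_mem_update_mono _ _ (h e he hce))

-- core: the staged full-rescan fold equals one update with the sieve's output
theorem pv_stageFold_eq_bkt (ms : List (String → Bool)) (acc : PySem.Set String)
    (xs : List (String × String)) :
    pvStageFold ms acc xs = PySem.Set.update acc (pvBkt ms xs) := by
  induction ms generalizing acc xs with
  | nil => rfl
  | cons m ms ih =>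
    have h : ∀ e ∈ xs, m e.1 = true
        → e.2 ∈ PySem.Set.update acc ((xs.filter (fun e => m e.1)).map Prod.snd) := by
      intro e he hme
      rw [PySem.Set.mem_update]
      exact Or.inr (List.mem_map_of_mem (List.mem_filter.mpr ⟨he, hme⟩))
    have step : pvStageFold (m :: ms) acc xs
        = pvStageFold ms (PySem.Set.update acc ((xs.filter (fun e => m e.1)).map Prod.snd)) xs := rfl
    rw [step, pv_stageFold_filter ms _ xs (fun e => m e.1) h, ih, pvBkt,
      PySem.Set.update, PySem.Set.update, PySem.Set.update, List.foldl_append]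

-- B's inner loop partitions the remaining entries, appending hits' actions
theorem pv_inner_partition (m : String → Bool) (xs : List (String × String))
    (col : List String) (rest : List (String × String)) :
    xs.foldl
      (fun (hr : List String × List (String × String)) e =>
        if m e.1 then (hr.1 ++ [e.2], hr.2) else (hr.1, hr.2 ++ [e]))
      (col, rest)
      = (col ++ (xs.filter (fun e => m e.1)).map Prod.snd,
         rest ++ xs.filter (fun e => !(m e.1))) := by
  induction xs generalizing col rest with
  | nil => simp
  | cons e xs ih =>
    by_cases h : m e.1 = true <;> simp [h, ih]

-- B's outer fold yields exactly the sieve list (and some remainder)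
theorem pv_outer_bkt (ms : List (String → Bool)) (xs : List (String × String))
    (col : List String) :
    (ms.foldl
      (fun (cr : List String × List (String × String)) mf =>
        cr.2.foldl
          (fun (hr : List String × List (String × String)) e =>
            if mf e.1 then (hr.1 ++ [e.2], hr.2) else (hr.1, hr.2 ++ [e]))
          (cr.1, []))
      (col, xs)).1 = col ++ pvBkt ms xs := by
  induction ms generalizing xs col with
  | nil => simp [pvBkt]
  | cons m ms ih =>
    rw [List.foldl_cons, pv_inner_partition, List.nil_append, pvBkt, ih, List.append_assoc]

-- ===== VERDICT (by name: the statement is the Claim_ definition above) =====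
theorem resolve_internal_py_spec : Claim_equal_resolve_internal_py := by
  intro principal resource _
  unfold Spec_resolve_internal_py resolve_internal_py resolve_internal_py_alt
  by_cases hr : resource = []
  · simp [hr]
  · by_cases hp : principal = []
    · simp [hr, hp]
    · rw [if_neg hr, if_neg hp, if_neg (show ¬(resource = [] ∨ principal = []) by simp [hr, hp])]
      dsimp only
      rw [pv_foldl_addIf, pv_principal_stageFold, pv_outer_bkt, List.nil_append]
      rw [show pvStageFold ((principal.filter (fun p => !(p == ""))).map
              (fun p t => PySem.Str.startswith t p))
            (PySem.Set.update PySem.Set.empty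
              ((resource.filter (fun p => p.1 == "any")).map Prod.snd)) resource
          = pvStageFold ((fun t => t == "any") ::
              (principal.filter (fun p => !(p == ""))).map (fun p t => PySem.Str.startswith t p))
              PySem.Set.empty resource from rfl]
      rw [pv_stageFold_eq_bkt]
      rfl
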